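-- pv_equiv track=rewrite | github.com/demanzonderjas/Chess-Coach | library.py | _split_pgn_stream
-- ===== SOURCE A (Python) =====
-- def _split_pgn_stream(text: str) -> list[str]:
--     """Split a multi-game PGN stream into individual game PGN strings.
--     Lichess returns games as PGN blocks separated by blank lines. We
--     split on the start of a new `[Event ` tag so the original text is
--     preserved verbatim (no python-chess re-emission that could change
--     tag formatting)."""
--     games: list[str] = []
--     current: list[str] = []
--     for line in text.splitlines():
--         if line.startswith("[Event ") and current:
--             chunk = "\n".join(current).strip()
--             if chunk:
--                 games.append(chunk)
--             current = [line]
--         else: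
--             current.append(line)
--     if current:
--         chunk = "\n".join(current).strip()
--         if chunk:
--             games.append(chunk)
--     return games
-- ===== SOURCE B (Python) =====
-- def _split_pgn_stream(text: str) -> list[str]:
--     lines = text.splitlines()
--     games: list[str] = []
--     n = len(lines)
--     i = 0
--     while i < n:
--         # a segment is the line at i plus all following lines up to the next "[Event " line
--         j = i + 1
--         while j < n and not lines[j].startswith("[Event "):
--             j += 1
--         chunk = "\n".join(lines[i:j]).strip()
--         if chunk:
--             games.append(chunk)
--         i = j
--     return games
-- ===== Notes on version B (the rewrite author's own statement) =====
-- stated objective: alternative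
-- what changed: Replaces A's running-buffer-with-flush-on-boundary loop by a two-level decomposition: first carve the line list into whole segments (a segment is a line plus all following lines up to the next '[Event ' line), then join/strip each segment and keep the non-empty ones.
import Mathlib
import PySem

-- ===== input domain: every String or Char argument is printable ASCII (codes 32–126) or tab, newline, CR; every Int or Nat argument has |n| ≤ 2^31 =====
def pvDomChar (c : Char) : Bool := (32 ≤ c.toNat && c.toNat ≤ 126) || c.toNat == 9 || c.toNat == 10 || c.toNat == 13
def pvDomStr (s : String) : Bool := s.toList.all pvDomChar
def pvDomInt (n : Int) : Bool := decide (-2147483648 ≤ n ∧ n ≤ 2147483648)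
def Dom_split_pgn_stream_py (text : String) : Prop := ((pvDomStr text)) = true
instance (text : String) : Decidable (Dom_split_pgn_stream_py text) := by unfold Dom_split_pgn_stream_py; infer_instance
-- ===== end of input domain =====

-- B carves the line list into whole segments first and then joins/strips/filters them,
-- instead of A's running buffer flushed at each "[Event " boundary (objective: alternative).

-- ===== PORT A =====
-- loop body of A's for-loop: state = (games, current)
def pvAStep (st : List String × List String) (line : String) : List String × List String :=
  if PySem.Str.startswith line "[Event " && !st.2.isEmpty then
    let chunk := PySem.Str.strip (PySem.Str.join "\n" st.2)
    (if chunk ≠ "" then st.1 ++ [chunk] else st.1, [line])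
  else
    (st.1, st.2 ++ [line])

-- A's final flush after the loop ("if current: …")
def pvAFinal (st : List String × List String) : List String :=
  if !st.2.isEmpty then
    let chunk := PySem.Str.strip (PySem.Str.join "\n" st.2)
    if chunk ≠ "" then st.1 ++ [chunk] else st.1
  else st.1

def split_pgn_stream_py (text : String) : List String :=
  pvAFinal ((PySem.Str.splitlines text).foldl pvAStep ([], []))

-- ===== PORT B =====
def pvIsCut (s : String) : Bool := PySem.Str.startswith s "[Event "

-- B's outer while loop: one segment (lines[i:j]) per iteration
def pvChunks : List String → List (List String)
  | [] => []
  | l :: rest =>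
      (l :: rest.takeWhile (fun s => !pvIsCut s)) :: pvChunks (rest.dropWhile (fun s => !pvIsCut s))
termination_by ls => ls.length
decreasing_by
  exact Nat.lt_succ_of_le (List.length_dropWhile_le _ _)

-- B's join/strip/append-if-nonempty for one segment
def pvBEmit (games : List String) (seg : List String) : List String :=
  let chunk := PySem.Str.strip (PySem.Str.join "\n" seg)
  if chunk ≠ "" then games ++ [chunk] else games

def split_pgn_stream_py_alt (text : String) : List String :=
  (pvChunks (PySem.Str.splitlines text)).foldl pvBEmit []

-- ===== PRECONDITION & SPEC =====
def Spec_split_pgn_stream_py (text : String) (out : List String) : Prop := out = split_pgn_stream_py_alt text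
instance (text : String) (out : List String) : Decidable (Spec_split_pgn_stream_py text out) := by unfold Spec_split_pgn_stream_py; infer_instance

-- ===== CLAIM (what is proved, stated in full; the proofs are below) =====
def Claim_equal_split_pgn_stream_py : Prop := ∀ (text : String), Dom_split_pgn_stream_py text → Spec_split_pgn_stream_py text (split_pgn_stream_py text)

-- ===== LEMMAS AND PROOFS =====

-- the segments A's buffer passes through, starting from an open segment `cur`
def pvSegsFrom (cur : List String) : List String → List (List String)
  | [] => [cur]
  | l :: ls => if pvIsCut l then cur :: pvSegsFrom [l] ls else pvSegsFrom (cur ++ [l]) ls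

def pvSegsTail : List String → List (List String)
  | [] => []
  | l :: ls => pvSegsFrom [l] ls

theorem pvSegsFrom_take_drop (ls : List String) : ∀ cur,
    pvSegsFrom cur ls =
      (cur ++ ls.takeWhile (fun s => !pvIsCut s)) ::
        pvSegsTail (ls.dropWhile (fun s => !pvIsCut s)) := by
  induction ls with
  | nil => intro cur; simp [pvSegsFrom, pvSegsTail]
  | cons l ls ih =>
    intro cur
    by_cases h : pvIsCut l = true
    · simp [pvSegsFrom, h, pvSegsTail]
    · simp only [Bool.not_eq_true] at h
      simp [pvSegsFrom, h, ih]

theorem pvSegsTail_eq_chunks : ∀ (ls : List String), pvSegsTail ls = pvChunks ls := by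
  intro ls
  induction hn : ls.length using Nat.strong_induction_on generalizing ls with
  | _ n ih =>
    match ls with
    | [] => unfold pvSegsTail pvChunks; rfl
    | l :: ls =>
      rw [pvSegsTail, pvSegsFrom_take_drop, pvChunks]
      have hlt : (ls.dropWhile (fun s => !pvIsCut s)).length < n := by
        subst hn
        exact Nat.lt_succ_of_le (List.length_dropWhile_le _ _)
      rw [ih _ hlt _ rfl]
      simp

theorem pvMain (ls : List String) : ∀ cur games, cur ≠ [] →
    pvAFinal (ls.foldl pvAStep (games, cur)) = (pvSegsFrom cur ls).foldl pvBEmit games := by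
  induction ls with
  | nil =>
    intro cur games hcur
    simp [pvAFinal, pvSegsFrom, pvBEmit, hcur]
  | cons l ls ih =>
    intro cur games hcur
    by_cases h : pvIsCut l = true
    · have hstep : pvAStep (games, cur) l = (pvBEmit games cur, [l]) := by
        simp [pvAStep, pvBEmit, pvIsCut] at h ⊢
        simp [h, hcur]
      simp only [List.foldl_cons, hstep, pvSegsFrom, h, if_true]
      exact ih [l] (pvBEmit games cur) (by simp)
    · have hstep : pvAStep (games, cur) l = (games, cur ++ [l]) := by
        simp [pvAStep, pvIsCut] at h ⊢
        simp [h]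
      rw [List.foldl_cons, hstep, pvSegsFrom, if_neg (by simp [h])]
      exact ih (cur ++ [l]) games (by simp)

-- ===== VERDICT (by name: the statement is the Claim_ definition above) =====
theorem split_pgn_stream_py_spec : Claim_equal_split_pgn_stream_py := by
  intro text _
  unfold Spec_split_pgn_stream_py split_pgn_stream_py split_pgn_stream_py_alt
  cases hls : PySem.Str.splitlines text with
  | nil => unfold pvChunks; simp [pvAFinal]
  | cons l ls =>
    have hfirst : pvAStep ([], []) l = ([], [l]) := by
      simp [pvAStep]
    rw [List.foldl_cons, hfirst, pvMain ls [l] [] (by simp), ← pvSegsTail_eq_chunks]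
    simp [pvSegsTail]
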